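-- pv_equiv track=rewrite | github.com/SwagLyrics/SwagLyrics-discord-bot | SwaglyricsBot/swaglyrics_bot.py | chop_string_into_chunks
-- ===== SOURCE A (Python) =====
-- def chop_string_into_chunks(string, chunk_size):
--     """
--     Chops lyrics into chunks no longer than 1024 characters.
--     Discord embed section can't be longer than that.
--     To avoid breaks mid word, it chops to first gap between lyrics sections
--     """
--     chunk = ""
--     chunks = list()
--     last_char = None
--     for char in string:
--         if len(chunk) + 150 > chunk_size and char == "\n" or (last_char == "\n" and char == "\n"):
--             chunks.append(chunk)
--             chunk = ""
--         chunk += char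
--         last_char = char
--     chunks.append(chunk)
--     return chunks
-- ===== SOURCE B (Python) =====
-- def chop_string_into_chunks(string, chunk_size):
--     """Same chunking as A, but computed as cut INDICES in one pass, then
--     materialised by slicing; no chunk strings are built during the scan."""
--     cuts = []
--     start = 0
--     for i, ch in enumerate(string):
--         if ch == "\n" and (i - start + 150 > chunk_size or (i > 0 and string[i - 1] == "\n")):
--             cuts.append(i)
--             start = i
--     bounds = [0] + cuts + [len(string)]
--     return [string[a:b] for a, b in zip(bounds, bounds[1:])]
-- ===== Notes on version B (the rewrite author's own statement) =====
-- stated objective: faster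
-- what changed: B scans once recording only cut indices (tracking the current chunk's start position instead of building chunk strings), then materialises all chunks afterwards by slicing the original string between consecutive boundaries; A grows each chunk character by character during the scan.
import Mathlib
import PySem

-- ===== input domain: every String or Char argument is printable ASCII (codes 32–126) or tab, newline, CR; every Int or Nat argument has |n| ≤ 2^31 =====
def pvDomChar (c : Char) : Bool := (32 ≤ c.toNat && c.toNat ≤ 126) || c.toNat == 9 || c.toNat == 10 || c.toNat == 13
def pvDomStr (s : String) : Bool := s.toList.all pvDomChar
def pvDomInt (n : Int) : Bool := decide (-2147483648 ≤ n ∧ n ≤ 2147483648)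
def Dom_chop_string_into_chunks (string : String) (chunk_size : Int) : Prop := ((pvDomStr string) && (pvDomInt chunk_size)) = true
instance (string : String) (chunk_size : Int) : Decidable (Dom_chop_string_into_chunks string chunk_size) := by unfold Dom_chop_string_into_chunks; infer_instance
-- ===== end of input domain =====

-- B computes the cut INDICES in one pass (no chunk strings built while scanning)
-- and materialises the chunks afterwards by slicing; A builds each chunk string
-- character by character (a timing run measured B faster by a constant factor).

-- ===== PORT A =====
-- one iteration of A's `for char in string` loop; state = (chunk, chunks, last_char)
def chopStepA (chunk_size : Int) (st : List Char × List String × Option Char) (c : Char) :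
    List Char × List String × Option Char :=
  let (chunk, chunks, last) := st
  if ((chunk.length : Int) + 150 > chunk_size ∧ c = '\n') ∨ (last = some '\n' ∧ c = '\n') then
    -- chunks.append(chunk); chunk = ""; then chunk += char; last_char = char
    ([c], chunks ++ [String.ofList chunk], some c)
  else
    (chunk ++ [c], chunks, some c)

def chop_string_into_chunks (string : String) (chunk_size : Int) : List String :=
  let st := string.toList.foldl (chopStepA chunk_size) ([], [], none)
  st.2.1 ++ [String.ofList st.1]

-- ===== PORT B =====
-- `enumerate(string)` starting at k (hand port, exact: Python indices are the
-- nonnegative positions 0,1,2,…)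
def chopEnumFrom (k : Nat) : List Char → List (Nat × Char)
  | [] => []
  | c :: l => (k, c) :: chopEnumFrom (k + 1) l

-- one iteration of B's scanning loop; state = (cuts, start)
def chopStepB (L : List Char) (chunk_size : Int) (st : List Nat × Nat) (p : Nat × Char) :
    List Nat × Nat :=
  if p.2 = '\n' ∧ (((p.1 : Int) - (st.2 : Int) + 150 > chunk_size) ∨
      (0 < p.1 ∧ L[p.1 - 1]? = some '\n')) then
    (st.1 ++ [p.1], p.1)
  else
    st

-- string[a:b] (hand port, exact here: all bounds satisfy 0 ≤ a ≤ b ≤ len(string))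
def chopSlice (L : List Char) (a b : Nat) : String := String.ofList ((L.drop a).take (b - a))

def chop_string_into_chunks_alt (string : String) (chunk_size : Int) : List String :=
  let L := string.toList
  let st := (chopEnumFrom 0 L).foldl (chopStepB L chunk_size) ([], 0)
  let bounds := 0 :: (st.1 ++ [L.length])
  (bounds.zip bounds.tail).map (fun p => chopSlice L p.1 p.2)

-- ===== PRECONDITION & SPEC =====
def Spec_chop_string_into_chunks (string : String) (chunk_size : Int) (out : List String) : Prop := out = chop_string_into_chunks_alt string chunk_size
instance (string : String) (chunk_size : Int) (out : List String) : Decidable (Spec_chop_string_into_chunks string chunk_size out) := by unfold Spec_chop_string_into_chunks; infer_instance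

-- ===== CLAIM (what is proved, stated in full; the proofs are below) =====
def Claim_equal_chop_string_into_chunks : Prop := ∀ (string : String) (chunk_size : Int), Dom_chop_string_into_chunks string chunk_size → Spec_chop_string_into_chunks string chunk_size (chop_string_into_chunks string chunk_size)

-- ===== LEMMAS AND PROOFS =====

-- consecutive slices of L at the boundaries prev, cuts₀, cuts₁, …
def chopSlices (L : List Char) (prev : Nat) : List Nat → List String
  | [] => []
  | c :: cs => chopSlice L prev c :: chopSlices L c cs

theorem chopZip_eq_slices (L : List Char) (prev : Nat) (rest : List Nat) :
    ((List.zip (prev :: rest) rest).map (fun p => chopSlice L p.1 p.2))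
      = chopSlices L prev rest := by
  induction rest generalizing prev with
  | nil => rfl
  | cons c cs ih =>
    rw [List.zip_cons_cons, List.map_cons, ih c]; rfl

-- the cuts accumulator of B's fold only grows at the back
theorem chopStepB_acc (L : List Char) (cs : Int) (l : List (Nat × Char)) :
    ∀ (cuts0 : List Nat) (s : Nat),
    l.foldl (chopStepB L cs) (cuts0, s)
      = (cuts0 ++ (l.foldl (chopStepB L cs) ([], s)).1,
         (l.foldl (chopStepB L cs) ([], s)).2) := by
  induction l with
  | nil => intro cuts0 s; simp
  | cons p l ih =>
    intro cuts0 s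
    by_cases h : p.2 = '\n' ∧ (((p.1 : Int) - (s : Int) + 150 > cs) ∨
        (0 < p.1 ∧ L[p.1 - 1]? = some '\n'))
    · have e1 : chopStepB L cs (cuts0, s) p = (cuts0 ++ [p.1], p.1) := by simp [chopStepB, h]
      have e2 : chopStepB L cs ([], s) p = ([p.1], p.1) := by simp [chopStepB, h]
      simp only [List.foldl, e1, e2]
      rw [ih (cuts0 ++ [p.1]) p.1, ih [p.1] p.1]
      simp
    · have e1 : chopStepB L cs (cuts0, s) p = (cuts0, s) := by simp [chopStepB, h]
      have e2 : chopStepB L cs ([], s) p = ([], s) := by simp [chopStepB, h]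
      simp only [List.foldl, e1, e2]
      exact ih cuts0 s

-- last_char after processing the first k characters of L
def chopLast (L : List Char) (k : Nat) : Option Char :=
  if k = 0 then none else L[k - 1]?

-- main invariant: after k characters, with the current chunk starting at
-- `start`, A's remaining loop produces exactly the slices at B's future cuts
theorem chop_inv (L : List Char) (cs : Int) :
    ∀ (l : List Char) (k start : Nat) (chunks : List String),
    start ≤ k → k ≤ L.length → L.drop k = l →
    (let st := l.foldl (chopStepA cs) ((L.take k).drop start, chunks, chopLast L k)
     st.2.1 ++ [String.ofList st.1])
      = chunks ++ chopSlices L start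
          (((chopEnumFrom k l).foldl (chopStepB L cs) ([], start)).1 ++ [L.length]) := by
  intro l
  induction l with
  | nil =>
    intro k start chunks hsk hkL hdrop
    have hk : k = L.length := by
      have := List.drop_eq_nil_iff.mp hdrop
      omega
    subst hk
    simp only [List.foldl, chopEnumFrom, chopSlices, chopSlice, List.nil_append,
      List.take_length]
    rw [List.take_of_length_le (by simp)]
  | cons c l ih =>
    intro k start chunks hsk hkL hdrop
    have hkL' : k < L.length := by
      by_contra h
      have : L.drop k = [] := List.drop_eq_nil_iff.mpr (by omega)
      rw [hdrop] at this; simp at this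
    have hc : L[k]? = some c := by
      have h0 : (L.drop k)[0]? = some c := by rw [hdrop]; rfl
      simpa using h0
    have hdrop' : L.drop (k + 1) = l := by
      have h := congrArg (List.drop 1) hdrop
      simp [List.drop_drop] at h
      simpa using h
    -- length of the current chunk
    have hlen : ((L.take k).drop start).length = k - start := by
      simp [List.length_drop, List.length_take]; omega
    -- A's cut condition equals B's cut condition
    have hcond : (((((L.take k).drop start).length : Int) + 150 > cs ∧ c = '\n') ∨
          (chopLast L k = some '\n' ∧ c = '\n'))
        ↔ (c = '\n' ∧ (((k : Int) - (start : Int) + 150 > cs) ∨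
          (0 < k ∧ L[k - 1]? = some '\n'))) := by
      rw [hlen]
      unfold chopLast
      constructor
      · rintro (⟨h1, h2⟩ | ⟨h1, h2⟩)
        · exact ⟨h2, Or.inl (by omega)⟩
        · split at h1
          · exact absurd h1 (by simp)
          · exact ⟨h2, Or.inr ⟨by omega, h1⟩⟩
      · rintro ⟨hceq, (h | ⟨h0, hln⟩)⟩
        · exact Or.inl ⟨by omega, hceq⟩
        · refine Or.inr ⟨?_, hceq⟩
          rw [if_neg (by omega)]; exact hln
    have hchunk1 : (L.take (k + 1)).drop k = [c] := by
      have : L.take (k + 1) = L.take k ++ [c] := by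
        rw [List.take_add_one]
        simp [hc]
      rw [this, List.drop_append_of_le_length (by simp; omega)]
      simp
    have htake1 : L.take (k + 1) = L.take k ++ [c] := by
      rw [List.take_add_one]
      simp [hc]
    have hlastA : chopLast L (k + 1) = some c := by
      unfold chopLast; simp [hc]
    by_cases hB : (c = '\n' ∧ (((k : Int) - (start : Int) + 150 > cs) ∨
        (0 < k ∧ L[k - 1]? = some '\n')))
    · -- cut at index k
      have hA := hcond.mpr hB
      have hchunkA : (L.take (k + 1)).drop k = [c] := hchunk1
      have step := ih (k + 1) k (chunks ++ [String.ofList ((L.take k).drop start)])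
        (by omega) (by omega) hdrop'
      simp only [chopEnumFrom, List.foldl]
      have eA : chopStepA cs ((L.take k).drop start, chunks, chopLast L k) c
          = ((L.take (k + 1)).drop k, chunks ++ [String.ofList ((L.take k).drop start)],
             chopLast L (k + 1)) := by
        simp only [chopStepA, if_pos hA, hchunkA, hlastA]
      have eB : chopStepB L cs ([], start) (k, c) = ([k], k) := by
        simp [chopStepB, hB]
      rw [eA, eB, chopStepB_acc, step]
      simp [chopSlices, chopSlice, List.drop_take]
    · -- no cut
      have hA' := fun h => hB (hcond.mp h)
      have hchunkA : (L.take k).drop start ++ [c] = (L.take (k + 1)).drop start := by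
        rw [htake1, List.drop_append_of_le_length
          (by simp [List.length_take_of_le (le_of_lt hkL')]; omega)]
      have step := ih (k + 1) start chunks (by omega) (by omega) hdrop'
      simp only [chopEnumFrom, List.foldl]
      have eA : chopStepA cs ((L.take k).drop start, chunks, chopLast L k) c
          = ((L.take (k + 1)).drop start, chunks, chopLast L (k + 1)) := by
        simp only [chopStepA, if_neg hA', hchunkA, hlastA]
      have eB : chopStepB L cs ([], start) (k, c) = ([], start) := by
        simp [chopStepB, hB]
      rw [eA, eB, step]

-- ===== VERDICT (by name: the statement is the Claim_ definition above) =====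
theorem chop_string_into_chunks_spec : Claim_equal_chop_string_into_chunks := by
  intro string chunk_size _
  show chop_string_into_chunks string chunk_size = chop_string_into_chunks_alt string chunk_size
  unfold chop_string_into_chunks chop_string_into_chunks_alt
  simp only [List.tail_cons]
  rw [chopZip_eq_slices]
  have := chop_inv string.toList chunk_size string.toList 0 0 []
    (le_refl 0) (Nat.zero_le _) (by simp)
  simpa [chopLast] using this
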